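-- pv_equiv track=rewrite | github.com/prongs394/Theory-of-Computation-project | UniversalProgram.py | generate_labels_array
-- ===== SOURCE A (Python) =====
-- def generate_labels_array(biggest_label):
--     labels_array = ['DUMMY']
--     number_of_fives = biggest_label // 5
--     for i in range(1, number_of_fives+2):
--         ai = f'A{i}'
--         bi = f'B{i}'
--         ci = f'C{i}'
--         di = f'D{i}'
--         ei = f'E{i}'
--         labels_array.extend([ai,bi,ci,di,ei])
--     return labels_array
-- ===== SOURCE B (Python) =====
-- def generate_labels_array(biggest_label):
--     n = biggest_label // 5
--     return ['DUMMY'] + [f'{"ABCDE"[k % 5]}{k // 5 + 1}' for k in range(5 * (n + 1))]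
-- ===== Notes on version B (the rewrite author's own statement) =====
-- stated objective: simpler
-- what changed: Replaces the group-by-group loop that extends five f-strings per iteration with a single flat comprehension over one running index, deriving each label's letter and number by modular and integer-division arithmetic.
import Mathlib
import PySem

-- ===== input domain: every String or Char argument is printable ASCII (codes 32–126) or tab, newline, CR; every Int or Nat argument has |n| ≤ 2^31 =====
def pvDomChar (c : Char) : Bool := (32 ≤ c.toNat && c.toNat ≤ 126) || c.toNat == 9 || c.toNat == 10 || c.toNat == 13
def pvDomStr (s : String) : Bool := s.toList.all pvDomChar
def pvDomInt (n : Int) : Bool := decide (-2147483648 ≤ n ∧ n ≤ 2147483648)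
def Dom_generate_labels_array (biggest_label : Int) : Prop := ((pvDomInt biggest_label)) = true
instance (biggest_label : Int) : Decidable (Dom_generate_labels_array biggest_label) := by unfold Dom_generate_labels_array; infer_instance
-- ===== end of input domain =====

-- B replaces the group-by-group loop (five f-strings extended per iteration) with one flat
-- comprehension over a single running index, deriving letter (k%5) and number (k//5+1) arithmetically.

-- ===== PORT A =====
def generate_labels_array (biggest_label : Int) : List String :=
  let labels_array : List String := ["DUMMY"]
  let number_of_fives := PySem.Int.floordiv biggest_label 5
  (PySem.List.pyRange 1 (number_of_fives + 2) 1).foldl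
    (fun acc i =>
      let ai := "A" ++ PySem.Int.toStr i
      let bi := "B" ++ PySem.Int.toStr i
      let ci := "C" ++ PySem.Int.toStr i
      let di := "D" ++ PySem.Int.toStr i
      let ei := "E" ++ PySem.Int.toStr i
      acc ++ [ai, bi, ci, di, ei]) labels_array

-- ===== PORT B =====
def generate_labels_array_alt (biggest_label : Int) : List String :=
  let n := PySem.Int.floordiv biggest_label 5
  "DUMMY" :: (PySem.List.pyRange 0 (5 * (n + 1)) 1).map
    (fun k =>
      -- "ABCDE"[k % 5] always hits the string (0 ≤ k%5 < 5), so the option is defaulted away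
      ((PySem.Str.pyGet? "ABCDE" (PySem.Int.mod k 5)).getD ' ').toString
        ++ PySem.Int.toStr (PySem.Int.floordiv k 5 + 1))

-- ===== PRECONDITION & SPEC =====
def Spec_generate_labels_array (biggest_label : Int) (out : List String) : Prop := out = generate_labels_array_alt biggest_label
instance (biggest_label : Int) (out : List String) : Decidable (Spec_generate_labels_array biggest_label out) := by unfold Spec_generate_labels_array; infer_instance

-- ===== CLAIM (what is proved, stated in full; the proofs are below) =====
def Claim_equal_generate_labels_array : Prop := ∀ (biggest_label : Int), Dom_generate_labels_array biggest_label → Spec_generate_labels_array biggest_label (generate_labels_array biggest_label)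

-- ===== LEMMAS AND PROOFS =====

-- B's label for a flat index 5*m + j (0 ≤ j < 5) reduces to letter j of "ABCDE" plus the group number m+1.
theorem pv_label_eq (m j : Int) (h0 : 0 ≤ j) (h5 : j < 5) :
    ((PySem.Str.pyGet? "ABCDE" (PySem.Int.mod (5 * m + j) 5)).getD ' ').toString
        ++ PySem.Int.toStr (PySem.Int.floordiv (5 * m + j) 5 + 1)
      = ((['A', 'B', 'C', 'D', 'E'].getD j.toNat ' ').toString) ++ PySem.Int.toStr (m + 1) := by
  have hmod : PySem.Int.mod (5 * m + j) 5 = j := by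
    rw [PySem.Int.mod_eq_emod_of_pos (by omega)]; omega
  have hdiv : PySem.Int.floordiv (5 * m + j) 5 = m := by
    rw [PySem.Int.floordiv_eq_ediv_of_pos (by omega)]; omega
  rw [hmod, hdiv]
  have : (PySem.Str.pyGet? "ABCDE" j).getD ' ' = ['A', 'B', 'C', 'D', 'E'].getD j.toNat ' ' := by
    interval_cases j <;> rfl
  rw [this]

-- the flat comprehension over one block [5m, 5m+5) is exactly A's five-element group for i = m+1
theorem pv_block_eq (m : Int) :
    (PySem.List.pyRange (5 * m) (5 * m + 5) 1).map
        (fun k => ((PySem.Str.pyGet? "ABCDE" (PySem.Int.mod k 5)).getD ' ').toString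
          ++ PySem.Int.toStr (PySem.Int.floordiv k 5 + 1))
      = ["A" ++ PySem.Int.toStr (m + 1), "B" ++ PySem.Int.toStr (m + 1),
         "C" ++ PySem.Int.toStr (m + 1), "D" ++ PySem.Int.toStr (m + 1),
         "E" ++ PySem.Int.toStr (m + 1)] := by
  have h5 : (5 * m + 5 - 5 * m).toNat = 5 := by omega
  rw [PySem.List.pyRange_one, h5]
  simp only [List.range_succ, List.range_zero, List.map_cons, List.map_nil,
    List.nil_append, List.cons_append]
  rw [show ((5 * m + (0 : Nat) : Int)) = 5 * m + (0 : Int) by push_cast; ring,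
    show ((5 * m + (1 : Nat) : Int)) = 5 * m + (1 : Int) by push_cast; ring,
    show ((5 * m + (2 : Nat) : Int)) = 5 * m + (2 : Int) by push_cast; ring,
    show ((5 * m + (3 : Nat) : Int)) = 5 * m + (3 : Int) by push_cast; ring,
    show ((5 * m + (4 : Nat) : Int)) = 5 * m + (4 : Int) by push_cast; ring,
    pv_label_eq m 0 (by omega) (by omega), pv_label_eq m 1 (by omega) (by omega),
    pv_label_eq m 2 (by omega) (by omega), pv_label_eq m 3 (by omega) (by omega),
    pv_label_eq m 4 (by omega) (by omega)]
  rfl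

-- the core identity, for the nonnegative group count
theorem pv_main (m : Nat) :
    (PySem.List.pyRange 1 ((m : Int) + 2) 1).flatMap
        (fun i => ["A" ++ PySem.Int.toStr i, "B" ++ PySem.Int.toStr i, "C" ++ PySem.Int.toStr i,
                   "D" ++ PySem.Int.toStr i, "E" ++ PySem.Int.toStr i])
      = (PySem.List.pyRange 0 (5 * ((m : Int) + 1)) 1).map
        (fun k => ((PySem.Str.pyGet? "ABCDE" (PySem.Int.mod k 5)).getD ' ').toString
          ++ PySem.Int.toStr (PySem.Int.floordiv k 5 + 1)) := by
  induction m with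
  | zero =>
      have hb := pv_block_eq 0
      norm_num at hb
      rw [show ((0 : Nat) : Int) + 2 = 1 + 1 by omega,
        PySem.List.pyRange_one_succ_right (by omega),
        PySem.List.pyRange_one_eq_nil (le_refl _)]
      norm_num [hb]
  | succ p ih =>
      rw [show ((p + 1 : Nat) : Int) + 2 = (((p : Nat) : Int) + 2) + 1 by push_cast; ring,
        PySem.List.pyRange_one_succ_right (by omega),
        show (5 * (((p + 1 : Nat) : Int) + 1)) = 5 * (((p : Nat) : Int) + 1) + 5 by push_cast; ring,
        PySem.List.pyRange_one_append 0 (5 * (((p : Nat) : Int) + 1)) _ (by omega) (by omega),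
        List.flatMap_append, List.map_append, ih,
        show (5 * (((p : Nat) : Int) + 1) + 5) = 5 * (((p : Nat) : Int) + 1) + 5 from rfl,
        pv_block_eq (((p : Nat) : Int) + 1)]
      simp only [List.flatMap_cons, List.flatMap_nil, List.append_nil]
      norm_num
      ring_nf

-- ===== VERDICT (by name: the statement is the Claim_ definition above) =====
theorem generate_labels_array_spec : Claim_equal_generate_labels_array := by
  intro biggest_label _
  unfold Spec_generate_labels_array generate_labels_array generate_labels_array_alt
  simp only []
  set n := PySem.Int.floordiv biggest_label 5 with hn
  rw [PySem.List.foldl_append_eq_flatMap]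
  by_cases hpos : 0 <= n
  · obtain ⟨m, hm⟩ : ∃ m : Nat, n = (m : Int) := ⟨n.toNat, by omega⟩
    rw [hm]
    simpa using congrArg (List.cons "DUMMY") (pv_main m)
  · rw [PySem.List.pyRange_one_eq_nil (by omega),
      PySem.List.pyRange_one_eq_nil (by omega)]
    simp
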